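-- pv_equiv track=rewrite | github.com/ArthurWie/PDFree | bookmarks_tool.py | toc_remove
-- ===== SOURCE A (Python) =====
-- def toc_remove(toc: list, index: int) -> list:
--     """Remove the entry at *index* and all its children."""
--     if not toc or index < 0 or index >= len(toc):
--         return list(toc)
--     level = toc[index][0]
--     end = index + 1
--     while end < len(toc) and toc[end][0] > level:
--         end += 1
--     return toc[:index] + toc[end:]
-- ===== SOURCE B (Python) =====
-- def toc_remove(toc: list, index: int) -> list:
--     """Remove the entry at *index* and all its children."""
--     if not toc or index < 0 or index >= len(toc):
--         return list(toc)
--     out = []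
--     skip_level = None
--     for i, entry in enumerate(toc):
--         if i == index:
--             skip_level = entry[0]
--             continue
--         if skip_level is not None:
--             if entry[0] > skip_level:
--                 continue
--             skip_level = None
--         out.append(entry)
--     return out
-- ===== Notes on version B (the rewrite author's own statement) =====
-- stated objective: alternative
-- what changed: A finds the end of the child block with a separate while-loop scan and then concatenates two slices; B is a single enumerate pass with a skip-level state flag that builds the output directly, never slicing or re-indexing.
import Mathlib
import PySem

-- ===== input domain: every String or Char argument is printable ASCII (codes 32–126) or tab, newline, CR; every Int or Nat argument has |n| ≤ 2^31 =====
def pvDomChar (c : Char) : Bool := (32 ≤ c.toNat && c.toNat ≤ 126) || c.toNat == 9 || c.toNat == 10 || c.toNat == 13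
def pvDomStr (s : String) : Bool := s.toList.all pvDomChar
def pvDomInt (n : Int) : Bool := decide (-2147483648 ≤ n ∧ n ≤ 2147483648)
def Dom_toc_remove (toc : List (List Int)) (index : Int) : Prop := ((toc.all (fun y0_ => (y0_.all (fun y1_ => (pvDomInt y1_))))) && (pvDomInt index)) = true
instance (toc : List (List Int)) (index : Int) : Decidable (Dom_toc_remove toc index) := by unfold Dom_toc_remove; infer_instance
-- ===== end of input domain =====

-- B replaces A's while-loop scan + two-slice concatenation by a single enumerate pass
-- with a skip-level state that builds the output directly (alternative decomposition).


-- ===== PORT A =====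
-- the while-loop 'end += 1' scan; entry[0] is ported as .headD 0, exact under
-- Pre_toc_remove (no empty entries; Python raises IndexError on an empty entry)
def tocScanA (toc : List (List Int)) (level : Int) (e : Nat) : Nat :=
  if h : e < toc.length then
    if ((toc.getD e []).headD 0) > level then tocScanA toc level (e + 1) else e
  else e
termination_by toc.length - e

def toc_remove (toc : List (List Int)) (index : Int) : List (List Int) :=
  if toc = [] ∨ index < 0 ∨ index ≥ (toc.length : Int) then toc
  else
    let level := ((PySem.List.pyGet? toc index).getD []).headD 0
    let e := tocScanA toc level (index.toNat + 1)
    PySem.List.slice toc (some 0) (some index) ++ PySem.List.slice toc (some (e : Int)) none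

-- ===== PORT B =====
-- one pass over enumerate(toc): state = (out, skip_level); entry[0] again ported as .headD 0
def tocStepB (index : Int) (st : List (List Int) × Option Int) (p : Int × List Int) :
    List (List Int) × Option Int :=
  if p.1 = index then (st.1, some (p.2.headD 0))
  else
    match st.2 with
    | some lvl =>
        if p.2.headD 0 > lvl then st
        else (st.1 ++ [p.2], none)
    | none => (st.1 ++ [p.2], none)

def toc_remove_alt (toc : List (List Int)) (index : Int) : List (List Int) :=
  if toc = [] ∨ index < 0 ∨ index ≥ (toc.length : Int) then toc
  else ((PySem.List.enumerate toc 0).foldl (tocStepB index) ([], none)).1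

-- ===== PRECONDITION & SPEC =====
-- Pre_ excludes exactly the inputs on which Python A (and likewise B) raises IndexError
-- reading entry[0]: a valid index whose entry is empty, or an empty entry reached by the
-- child scan (every entry strictly between index and it has level > the removed level).
def Pre_toc_remove (toc : List (List Int)) (index : Int) : Prop :=
  (0 ≤ index ∧ index < (toc.length : Int)) →
    (toc.getD index.toNat [] ≠ [] ∧
     ∀ j < toc.length, index.toNat < j → toc.getD j [] = [] →
       ∃ k < j, index.toNat < k ∧ (toc.getD k []).headD 0 ≤ (toc.getD index.toNat []).headD 0)
instance (toc : List (List Int)) (index : Int) : Decidable (Pre_toc_remove toc index) := by unfold Pre_toc_remove; infer_instance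

def pvWitness_toc_remove : List (List Int) × Int := ([[0], [1], [2, 5], [0]], 1)

def Spec_toc_remove (toc : List (List Int)) (index : Int) (out : List (List Int)) : Prop := out = toc_remove_alt toc index
instance (toc : List (List Int)) (index : Int) (out : List (List Int)) : Decidable (Spec_toc_remove toc index out) := by unfold Spec_toc_remove; infer_instance

-- ===== CLAIM (what is proved, stated in full; the proofs are below) =====
def Claim_equal_toc_remove : Prop := ∀ (toc : List (List Int)) (index : Int), Dom_toc_remove toc index → Pre_toc_remove toc index → Spec_toc_remove toc index (toc_remove toc index)

-- ===== LEMMAS AND PROOFS =====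

-- length of the leading run of entries whose level is > lvl
def tocCnt (xs : List (List Int)) (lvl : Int) : Nat :=
  match xs with
  | [] => 0
  | y :: ys => if y.headD 0 > lvl then tocCnt ys lvl + 1 else 0

theorem tocScanA_eq_cnt (toc : List (List Int)) (level : Int) (e : Nat) :
    tocScanA toc level e = e + tocCnt (toc.drop e) level := by
  by_cases h : e < toc.length
  · have hd : toc.drop e = toc[e] :: toc.drop (e + 1) := List.drop_eq_getElem_cons h
    have hg : toc.getD e [] = toc[e] := List.getD_eq_getElem toc [] h
    rw [tocScanA, dif_pos h, hd, tocCnt, hg]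
    split_ifs with hc
    · rw [tocScanA_eq_cnt toc level (e + 1)]; omega
    · omega
  · have hd : toc.drop e = [] := List.drop_eq_nil_of_le (by omega)
    rw [tocScanA, dif_neg h, hd, tocCnt]
    omega
termination_by toc.length - e

-- phase with skip_level = none and all indices ≠ index: everything is appended
theorem foldB_none (index : Int) (xs : List (List Int)) (s : Int) (out : List (List Int))
    (h : ∀ k : Nat, k < xs.length → s + k ≠ index) :
    List.foldl (tocStepB index) (out, none) (PySem.List.enumerate xs s) = (out ++ xs, none) := by
  induction xs generalizing s out with
  | nil => simp [PySem.List.enumerate_nil]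
  | cons y ys ih =>
      have hs : s ≠ index := by have := h 0 (by simp); simpa using this
      rw [PySem.List.enumerate_cons]
      simp only [List.foldl_cons, tocStepB, if_neg hs]
      rw [ih (s + 1) (out ++ [y]) (fun k hk => by
        have := h (k + 1) (by simp; omega); push_cast at this ⊢; omega)]
      simp

-- phase with skip_level = some lvl and all indices ≠ index: drop the leading run, append the rest
theorem foldB_some (index : Int) (xs : List (List Int)) (s : Int) (out : List (List Int))
    (lvl : Int) (h : ∀ k : Nat, k < xs.length → s + k ≠ index) :
    (List.foldl (tocStepB index) (out, some lvl) (PySem.List.enumerate xs s)).1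
      = out ++ xs.drop (tocCnt xs lvl) := by
  induction xs generalizing s out with
  | nil => simp [PySem.List.enumerate_nil, tocCnt]
  | cons y ys ih =>
      have hs : s ≠ index := by have := h 0 (by simp); simpa using this
      rw [PySem.List.enumerate_cons]
      simp only [List.foldl_cons, tocStepB, if_neg hs, tocCnt]
      by_cases hc : y.headD 0 > lvl
      · rw [if_pos hc]
        simp only [if_pos hc]
        exact ih (s + 1) out (fun k hk => by
          have := h (k + 1) (by simp; omega); push_cast at this ⊢; omega)
      · rw [if_neg hc]
        simp only [if_neg hc, List.drop_zero]
        rw [foldB_none index ys (s + 1) (out ++ [y]) (fun k hk => by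
          have := h (k + 1) (by simp; omega); push_cast at this ⊢; omega)]
        simp

theorem toc_remove_eq (toc : List (List Int)) (index : Int) :
    toc_remove toc index = toc_remove_alt toc index := by
  unfold toc_remove toc_remove_alt
  split_ifs with hguard
  · rfl
  · push Not at hguard
    obtain ⟨hne, h0, hlen⟩ := hguard
    set n := index.toNat with hn
    have hn' : index = (n : Int) := by omega
    have hlt : n < toc.length := by omega
    -- decompose toc around position n
    have hsplit : toc = toc.take n ++ toc[n] :: toc.drop (n + 1) := by
      conv_lhs => rw [← List.take_append_drop n toc]
      rw [List.drop_eq_getElem_cons hlt]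
    have hlevel : ((PySem.List.pyGet? toc index).getD []).headD 0 = toc[n].headD 0 := by
      rw [hn', PySem.List.pyGet?_natCast, List.getElem?_eq_getElem hlt]; rfl
    -- A's side
    have hA : PySem.List.slice toc (some 0) (some index) ++
        PySem.List.slice toc (some ((tocScanA toc (toc[n].headD 0) (n + 1) : Nat) : Int)) none
        = toc.take n ++ (toc.drop (n + 1)).drop (tocCnt (toc.drop (n + 1)) (toc[n].headD 0)) := by
      rw [PySem.List.slice_zero_start, hn', PySem.List.slice_to_natCast,
          PySem.List.slice_from_natCast, tocScanA_eq_cnt, List.drop_drop]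
    -- B's side
    have hB : ((PySem.List.enumerate toc 0).foldl (tocStepB index) ([], none)).1
        = toc.take n ++ (toc.drop (n + 1)).drop (tocCnt (toc.drop (n + 1)) (toc[n].headD 0)) := by
      conv_lhs => rw [hsplit]
      rw [PySem.List.enumerate_append, List.foldl_append,
          foldB_none index (toc.take n) 0 [] (fun k hk => by
            simp at hk; omega)]
      rw [PySem.List.enumerate_cons, List.foldl_cons]
      have htk : (toc.take n).length = n := by rw [List.length_take]; omega
      have hlen' : (0 : Int) + (toc.take n).length = index := by rw [htk]; omega
      rw [hlen']
      simp only [tocStepB, if_true, List.nil_append]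
      rw [foldB_some index (toc.drop (n + 1)) (index + 1) (toc.take n)
            (toc[n].headD 0) (fun k hk => by omega)]
    simp only [hlevel]
    rw [hA, hB]

-- ===== VERDICT (by name: the statement is the Claim_ definition above) =====
theorem toc_remove_spec : Claim_equal_toc_remove := by
  intro toc index _ _
  unfold Spec_toc_remove
  exact toc_remove_eq toc index
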